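-- pv_equiv track=rewrite | github.com/ellite/anchor-sub-sync | anchor/core/transcribe/transcribe.py | merge_suspicious_zones
-- ===== SOURCE A (Python) =====
-- MAX_MERGE_GAP = 2
--
-- def merge_suspicious_zones(indices):
--     if not indices: return []
--     zones = []
--     current_start = indices[0]
--     current_end = indices[0]
--     for i in range(1, len(indices)):
--         idx = indices[i]
--         if idx - current_end <= MAX_MERGE_GAP + 1:
--             current_end = idx
--         else:
--             zones.append((current_start, current_end))
--             current_start = idx
--             current_end = idx
--     zones.append((current_start, current_end))
--     return zones
-- ===== SOURCE B (Python) =====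
-- MAX_MERGE_GAP = 2
--
-- def merge_suspicious_zones(indices):
--     # Pairwise decomposition: find gap boundaries with zip, then pair up
--     # zone starts with zone ends.
--     if not indices:
--         return []
--     gap = MAX_MERGE_GAP + 1
--     starts = [indices[0]] + [b for a, b in zip(indices, indices[1:]) if b - a > gap]
--     ends = [a for a, b in zip(indices, indices[1:]) if b - a > gap] + [indices[-1]]
--     return list(zip(starts, ends))
-- ===== Notes on version B (the rewrite author's own statement) =====
-- stated objective: alternative
-- what changed: Replaces the stateful accumulator loop (current_start/current_end mutated across iterations) by a stateless pairwise decomposition: zone starts and zone ends are read off the adjacent-pair gaps with zip comprehensions and then zipped together.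
import Mathlib
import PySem

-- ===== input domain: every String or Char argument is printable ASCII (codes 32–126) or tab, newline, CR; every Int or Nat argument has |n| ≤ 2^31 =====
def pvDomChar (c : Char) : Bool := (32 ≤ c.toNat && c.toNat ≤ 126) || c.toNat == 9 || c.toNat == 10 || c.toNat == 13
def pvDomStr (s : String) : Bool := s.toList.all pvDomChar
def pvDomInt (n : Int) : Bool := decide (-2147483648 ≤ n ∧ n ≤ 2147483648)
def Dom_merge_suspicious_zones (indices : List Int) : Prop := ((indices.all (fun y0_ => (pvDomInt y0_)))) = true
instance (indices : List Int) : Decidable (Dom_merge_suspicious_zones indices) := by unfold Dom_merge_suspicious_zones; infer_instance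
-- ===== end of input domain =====

-- B replaces A's stateful accumulator loop by a stateless pairwise decomposition
-- (gap boundaries from adjacent pairs, starts zipped with ends); same O(n) cost.

-- ===== PORT A =====
-- for i in range(1, len(indices)): state (zones, current_start, current_end)
def merge_suspicious_zones (indices : List Int) : List (Int × Int) :=
  match indices with
  | [] => []
  | x :: rest =>
    let st := rest.foldl (fun (st : List (Int × Int) × Int × Int) idx =>
      let (zones, cs, ce) := st
      if idx - ce ≤ 2 + 1 then (zones, cs, idx)
      else (zones ++ [(cs, ce)], idx, idx)) ([], x, x)
    st.1 ++ [(st.2.1, st.2.2)]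

-- ===== PORT B =====
def merge_suspicious_zones_alt (indices : List Int) : List (Int × Int) :=
  match indices with
  | [] => []
  | x :: rest =>
    let pairs := List.zip (x :: rest) rest
    let starts := x :: (pairs.filter (fun p => decide (p.2 - p.1 > 2 + 1))).map (fun p => p.2)
    let ends := (pairs.filter (fun p => p.2 - p.1 > 2 + 1)).map (fun p => p.1)
                  ++ [(x :: rest).getLast (by simp)]  -- indices[-1], list nonempty here
    List.zip starts ends

-- ===== PRECONDITION & SPEC =====
def Spec_merge_suspicious_zones (indices : List Int) (out : List (Int × Int)) : Prop := out = merge_suspicious_zones_alt indices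
instance (indices : List Int) (out : List (Int × Int)) : Decidable (Spec_merge_suspicious_zones indices out) := by unfold Spec_merge_suspicious_zones; infer_instance

-- ===== CLAIM (what is proved, stated in full; the proofs are below) =====
def Claim_equal_merge_suspicious_zones : Prop := ∀ (indices : List Int), Dom_merge_suspicious_zones indices → Spec_merge_suspicious_zones indices (merge_suspicious_zones indices)

-- ===== LEMMAS AND PROOFS =====

-- reference recursion: zones emitted from start cs with previous element prev
def pvGo (cs prev : Int) : List Int → List (Int × Int)
  | [] => [(cs, prev)]
  | x :: xs => if x - prev ≤ 2 + 1 then pvGo cs x xs else (cs, prev) :: pvGo x x xs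

-- A's fold equals the reference recursion
theorem pvFoldA (l : List Int) (zones : List (Int × Int)) (cs prev : Int) :
    (let st := l.foldl (fun (st : List (Int × Int) × Int × Int) idx =>
      let (zones, cs, ce) := st
      if idx - ce ≤ 2 + 1 then (zones, cs, idx)
      else (zones ++ [(cs, ce)], idx, idx)) (zones, cs, prev)
     st.1 ++ [(st.2.1, st.2.2)]) = zones ++ pvGo cs prev l := by
  induction l generalizing zones cs prev with
  | nil => simp [pvGo]
  | cons x xs ih =>
    by_cases h : x - prev ≤ 2 + 1
    · have h2 : x ≤ 3 + prev := by omega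
      have H := ih zones cs x
      simp at H
      simp [pvGo, h2, List.foldl_cons, H]
    · have h2 : ¬ x ≤ 3 + prev := by omega
      have H := ih (zones ++ [(cs, prev)]) x x
      simp at H
      simp [pvGo, h2, List.foldl_cons, H]

-- B's pairwise decomposition equals the reference recursion
theorem pvZipB (l : List Int) (cs prev : Int) :
    pvGo cs prev l =
      List.zip
        (cs :: ((List.zip (prev :: l) l).filter (fun p => decide (p.2 - p.1 > 2 + 1))).map (fun p => p.2))
        (((List.zip (prev :: l) l).filter (fun p => decide (p.2 - p.1 > 2 + 1))).map (fun p => p.1)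
          ++ [List.getLast (prev :: l) (by simp)]) := by
  induction l generalizing cs prev with
  | nil => simp [pvGo]
  | cons x xs ih =>
    by_cases h : x - prev ≤ 2 + 1
    · have h2 : x ≤ 3 + prev := by omega
      have h3 : ¬ (3 : Int) < x - prev := by omega
      simp [pvGo, h2, h3, List.zip_cons_cons, List.getLast, ih cs x]
    · have h2 : ¬ x ≤ 3 + prev := by omega
      have h3 : (3 : Int) < x - prev := by omega
      simp [pvGo, h2, h3, List.zip_cons_cons, List.getLast, ih x x]

-- ===== VERDICT (by name: the statement is the Claim_ definition above) =====
theorem merge_suspicious_zones_spec : Claim_equal_merge_suspicious_zones := by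
  intro indices _
  unfold Spec_merge_suspicious_zones
  cases indices with
  | nil => rfl
  | cons x rest =>
    show merge_suspicious_zones (x :: rest) = merge_suspicious_zones_alt (x :: rest)
    simp only [merge_suspicious_zones, merge_suspicious_zones_alt]
    rw [pvFoldA rest [] x x, pvZipB rest x x]
    simp
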